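-- pv_equiv track=rewrite | github.com/Musheer2211/mtxt | decoder.py | decode_simple
-- ===== SOURCE A (Python) =====
-- tree = ' eatoinshrdlcumwfgypbvkjxqz'
--
-- def binary(x):
--     output = []
--     for i in range(8):
--         output.append(x&1)
--         x >>= 1
--     return output[::-1]
--
-- def decode_simple(bytes_list):
--     result = ''
--     encoded_list = []
--     for i in bytes_list:
--
--         encoded_list.extend(binary(i))
--
--     idx = 0
--
--     for i in encoded_list:
--         if i == 0:
--             idx += 1
--         elif i == 1:
--             result += tree[idx]
--             idx = 0
--
--     return result
-- ===== SOURCE B (Python) =====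
-- tree = ' eatoinshrdlcumwfgypbvkjxqz'
--
-- def decode_simple(bytes_list):
--     # Expand every byte to its 8 low bits, MSB first, as a '0'/'1' string.
--     bits = ''.join(format(b % 256, '08b') for b in bytes_list)
--     # Each '1' ends a run; the run length before it indexes the lookup table.
--     # The last split segment is the trailing padding of zeros (or empty) and is dropped.
--     return ''.join(tree[len(run)] for run in bits.split('1')[:-1])
-- ===== Notes on version B (the rewrite author's own statement) =====
-- stated objective: alternative
-- what changed: Instead of A's per-bit state machine (an explicit idx counter incremented on 0 and reset on 1 over an explicitly built bit list), B builds the whole MSB-first bit string with format(b % 256, '08b') and decodes by splitting it on '1', mapping each segment's length through the lookup table and dropping the trailing padding segment.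
import Mathlib
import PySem

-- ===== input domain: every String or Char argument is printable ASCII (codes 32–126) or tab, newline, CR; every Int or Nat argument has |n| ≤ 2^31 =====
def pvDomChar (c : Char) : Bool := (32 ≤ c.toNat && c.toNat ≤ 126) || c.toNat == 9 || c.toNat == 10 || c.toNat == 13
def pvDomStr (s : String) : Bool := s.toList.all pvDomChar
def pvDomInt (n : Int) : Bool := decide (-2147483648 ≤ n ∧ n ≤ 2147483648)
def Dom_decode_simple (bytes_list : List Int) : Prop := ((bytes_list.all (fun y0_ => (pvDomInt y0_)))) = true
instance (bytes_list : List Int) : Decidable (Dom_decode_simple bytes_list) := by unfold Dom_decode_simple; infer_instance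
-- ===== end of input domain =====

-- B replaces A's explicit bit-emitting loop and idx counter/reset state machine by building
-- the whole MSB-first bit string once and splitting it on '1' (each zero-run's length indexes
-- the table); equivalence of the two decompositions is proved below (objective: alternative).

-- ===== PORT A =====
def pvTree : List Char :=
  [' ','e','a','t','o','i','n','s','h','r','d','l','c','u','m','w','f','g','y','p','b','v','k','j','x','q','z']

-- binary(x): append x&1 eight times, halving x, then reverse ([::-1])
def binary (x : Int) : List Int :=
  (((List.range 8).foldl (fun (s : List Int × Int) _ =>
      (s.1 ++ [PySem.Int.band s.2 1], s.2 >>> (1:Nat))) ([], x)).1).reverse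

def decode_simple (bytes_list : List Int) : String :=
  let encoded_list : List Int := bytes_list.foldl (fun acc i => acc ++ binary i) []
  let r := encoded_list.foldl (fun (s : List Char × Int) i =>
      if i == 0 then (s.1, s.2 + 1)
      else if i == 1 then (s.1 ++ [(PySem.List.pyGet? pvTree s.2).getD '?'], 0)
      else s) (([] : List Char), (0:Int))
  String.ofList r.1

-- ===== PORT B =====
-- format(b % 256, '08b'): binary digits, zero-padded on the left to width 8
def byteBits (b : Int) : List Char :=
  let s := PySem.Int.toBinChars (PySem.Int.mod b 256)
  List.replicate (8 - s.length) '0' ++ s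

def decode_simple_alt (bytes_list : List Int) : String :=
  let bits : List Char := (bytes_list.map byteBits).flatten
  let runs := PySem.List.slice ((PySem.Chars.split? bits ['1']).getD []) none (some (-1))
  -- ''.join of the one-character strings tree[len(run)] is the list of those characters
  String.ofList (runs.map (fun run => (PySem.List.pyGet? pvTree (PySem.List.len run)).getD '?'))

-- ===== PRECONDITION & SPEC =====
-- the MSB-first low-8-bit expansion of the input, used only to state Pre_
def binList (e : Int) : List Int :=
  [(e/128)%2, (e/64)%2, (e/32)%2, (e/16)%2, (e/8)%2, (e/4)%2, (e/2)%2, e%2]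
def pvBitsOf (bytes_list : List Int) : List Int := bytes_list.flatMap (fun b => binList (b % 256))

-- Pre_ excludes exactly the inputs whose bit stream has a run of ≥ 27 zeros immediately
-- before a 1: there the Python A (and B) raises IndexError on the 27-entry lookup table.
def Pre_decode_simple (bytes_list : List Int) : Prop :=
  ¬ (List.replicate 27 (0:Int) ++ [(1:Int)]) <:+: pvBitsOf bytes_list
instance (bytes_list : List Int) : Decidable (Pre_decode_simple bytes_list) := by
  unfold Pre_decode_simple; infer_instance

def pvWitness_decode_simple : List Int := [97, 116, 32]

def Spec_decode_simple (bytes_list : List Int) (out : String) : Prop := out = decode_simple_alt bytes_list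
instance (bytes_list : List Int) (out : String) : Decidable (Spec_decode_simple bytes_list out) := by
  unfold Spec_decode_simple; infer_instance

-- ===== CLAIM (what is proved, stated in full; the proofs are below) =====
def Claim_equal_decode_simple : Prop := ∀ (bytes_list : List Int), Dom_decode_simple bytes_list → Pre_decode_simple bytes_list → Spec_decode_simple bytes_list (decode_simple bytes_list)

-- ===== LEMMAS AND PROOFS =====

theorem binary_eq (x : Int) : binary x = binList (x % 256) := by
  show [PySem.Int.band (x>>>(1:Nat)>>>(1:Nat)>>>(1:Nat)>>>(1:Nat)>>>(1:Nat)>>>(1:Nat)>>>(1:Nat)) 1,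
   PySem.Int.band (x>>>(1:Nat)>>>(1:Nat)>>>(1:Nat)>>>(1:Nat)>>>(1:Nat)>>>(1:Nat)) 1,
   PySem.Int.band (x>>>(1:Nat)>>>(1:Nat)>>>(1:Nat)>>>(1:Nat)>>>(1:Nat)) 1,
   PySem.Int.band (x>>>(1:Nat)>>>(1:Nat)>>>(1:Nat)>>>(1:Nat)) 1,
   PySem.Int.band (x>>>(1:Nat)>>>(1:Nat)>>>(1:Nat)) 1,
   PySem.Int.band (x>>>(1:Nat)>>>(1:Nat)) 1,
   PySem.Int.band (x>>>(1:Nat)) 1,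
   PySem.Int.band x 1] = _
  simp only [PySem.Int.band_one, PySem.Int.mod_eq_emod_of_pos (by omega : (0:Int) < 2),
    Int.shiftRight_eq_div_pow, binList]
  norm_num [List.cons.injEq]
  and_intros <;> omega

def bitChar (i : Int) : Char := if i = 1 then '1' else '0'

theorem pad_toBin (m : Nat) (h : m < 256) :
    (List.replicate (8 - (PySem.Int.toBinChars (m:Int)).length) '0' ++ PySem.Int.toBinChars (m:Int))
      = (binList (m:Int)).map bitChar := by
  revert h; revert m
  set_option maxRecDepth 100000 in decide

theorem byteBits_eq (b : Int) : byteBits b = (binary b).map bitChar := by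
  rw [binary_eq]
  show List.replicate (8 - (PySem.Int.toBinChars (PySem.Int.mod b 256)).length) '0'
        ++ PySem.Int.toBinChars (PySem.Int.mod b 256) = _
  rw [PySem.Int.mod_eq_emod_of_pos (by omega : (0:Int) < 256)]
  have h0 : (0:Int) ≤ b % 256 := Int.emod_nonneg b (by omega)
  have h1 : b % 256 < 256 := Int.emod_lt_of_pos b (by omega)
  have hc : b % 256 = ((b % 256).toNat : Int) := (Int.toNat_of_nonneg h0).symm
  rw [hc]
  exact pad_toBin (b % 256).toNat (by omega)

def treeD (n : Nat) : Char := (PySem.List.pyGet? pvTree (n:Int)).getD '?'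

-- common decode shape: run-length counting over the bit list
def dec : List Int → Nat → List Char
  | [], _ => []
  | i :: t, n => if i = 0 then dec t (n+1) else if i = 1 then treeD n :: dec t 0 else dec t n

theorem foldA (bits : List Int) (res : List Char) (n : Nat) :
    (bits.foldl (fun (s : List Char × Int) i =>
      if i == 0 then (s.1, s.2 + 1)
      else if i == 1 then (s.1 ++ [(PySem.List.pyGet? pvTree s.2).getD '?'], 0)
      else s) (res, (n:Int))).1 = res ++ dec bits n := by
  induction bits generalizing res n with
  | nil => simp [dec]
  | cons i t ih =>
    rw [List.foldl_cons]
    by_cases h0 : i = 0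
    · subst h0
      simp only [show ((0:Int) == 0) = true by decide, if_true]
      rw [show ((n:Int) + 1) = ((n+1 : Nat) : Int) by push_cast; ring, ih]
      simp [dec]
    · by_cases h1 : i = 1
      · subst h1
        simp only [show ((1:Int) == 0) = false by decide, show ((1:Int) == 1) = true by decide,
          Bool.false_eq_true, if_false, if_true]
        have h4 := ih (res ++ [(PySem.List.pyGet? pvTree (n:Int)).getD '?']) 0
        rw [Nat.cast_zero] at h4
        rw [h4]
        simp [dec, treeD]
      · simp only [show (i == 0) = false by simpa using h0, show (i == 1) = false by simpa using h1,
          Bool.false_eq_true, if_false]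
        rw [ih]
        simp [dec, h0, h1]

def consHead (x : List Char) : List (List Char) → List (List Char)
  | [] => [x]
  | h :: t => (x ++ h) :: t

def splitChar : List Char → List (List Char)
  | [] => [[]]
  | c :: t => if c = '1' then [] :: splitChar t else consHead [c] (splitChar t)

theorem consHead_ne_nil (x : List Char) (X : List (List Char)) : consHead x X ≠ [] := by
  cases X <;> simp [consHead]

theorem splitChar_ne_nil (cs : List Char) : splitChar cs ≠ [] := by
  cases cs with
  | nil => simp [splitChar]
  | cons c t =>
    unfold splitChar
    split_ifs
    · simp
    · exact consHead_ne_nil _ _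

theorem consHead_nil (X : List (List Char)) (h : X ≠ []) : consHead [] X = X := by
  cases X with
  | nil => exact absurd rfl h
  | cons a b => simp [consHead]

theorem consHead_consHead (a b : List Char) (X : List (List Char)) :
    consHead a (consHead b X) = consHead (a ++ b) X := by
  cases X <;> simp [consHead]

theorem go_eq (fuel : Nat) (l cur : List Char) (acc : List (List Char)) (h : l.length ≤ fuel) :
    PySem.Chars.splitOn.go ['1'] fuel l cur acc = acc.reverse ++ consHead cur.reverse (splitChar l) := by
  induction fuel generalizing l cur acc with
  | zero =>
    have hl : l = [] := by simpa using h
    subst hl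
    rw [PySem.Chars.splitOn.go]
    simp [splitChar, consHead]
  | succ fuel ih =>
    have s1 : ∀ r, splitChar ('1' :: r) = [] :: splitChar r := by intro r; simp [splitChar]
    have s2 : ∀ c r, c ≠ '1' → splitChar (c :: r) = consHead [c] (splitChar r) := by
      intro c r hc; simp [splitChar, hc]
    cases l with
    | nil =>
      rw [PySem.Chars.splitOn.go] <;> simp [splitChar, consHead]
    | cons c rest =>
      rw [PySem.Chars.splitOn.go]
      by_cases hc : c = '1'
      · subst hc
        rw [if_pos (by simp [List.isPrefixOf] : (['1'].isPrefixOf ('1' :: rest)) = true)]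
        rw [ih _ _ _ (by simp at h ⊢; omega)]
        rw [s1, List.reverse_nil, consHead_nil _ (splitChar_ne_nil _)]
        simp only [List.length_cons, List.drop_succ_cons, List.reverse_cons]
        cases hS : splitChar rest with
        | nil => exact absurd hS (splitChar_ne_nil rest)
        | cons a b => simp [consHead, hS]
      · rw [if_neg (by simp [List.isPrefixOf]; exact fun hcontra => hc hcontra.symm)]
        rw [ih _ _ _ (by simp at h ⊢; omega)]
        rw [s2 c rest hc, consHead_consHead]
        simp

theorem splitOn_eq (s : List Char) : PySem.Chars.splitOn s ['1'] = splitChar s := by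
  unfold PySem.Chars.splitOn
  rw [go_eq _ _ _ _ (by omega)]
  simp [consHead_nil _ (splitChar_ne_nil s)]

theorem decSplit (bits : List Int) (hb : ∀ i ∈ bits, i = 0 ∨ i = 1) (n : Nat) :
    ((consHead (List.replicate n '0') (splitChar (bits.map bitChar))).dropLast).map
      (fun run => (PySem.List.pyGet? pvTree (PySem.List.len run)).getD '?') = dec bits n := by
  induction bits generalizing n with
  | nil => simp [splitChar, consHead, dec]
  | cons i t ih =>
    have hi : i = 0 ∨ i = 1 := hb i (List.mem_cons_self)
    have hbt : ∀ j ∈ t, j = 0 ∨ j = 1 := fun j hj => hb j (List.mem_cons_of_mem _ hj)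
    rcases hi with h0 | h1
    · subst h0
      show ((consHead (List.replicate n '0') (splitChar (bitChar 0 :: t.map bitChar))).dropLast).map _ = _
      have hbc : bitChar 0 = '0' := by decide
      rw [hbc]
      rw [show splitChar ('0' :: t.map bitChar) = consHead ['0'] (splitChar (t.map bitChar)) by
        simp [splitChar]]
      rw [consHead_consHead]
      have : List.replicate n '0' ++ ['0'] = List.replicate (n+1) '0' := by
        rw [← List.replicate_succ']
      rw [this, ih hbt (n+1)]
      simp [dec]
    · subst h1
      show ((consHead (List.replicate n '0') (splitChar (bitChar 1 :: t.map bitChar))).dropLast).map _ = _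
      have hbc : bitChar 1 = '1' := by decide
      rw [hbc]
      rw [show splitChar ('1' :: t.map bitChar) = [] :: splitChar (t.map bitChar) by
        simp [splitChar]]
      have hcons : consHead (List.replicate n '0') ([] :: splitChar (t.map bitChar))
          = List.replicate n '0' :: splitChar (t.map bitChar) := by simp [consHead]
      rw [hcons, List.dropLast_cons_of_ne_nil (splitChar_ne_nil _)]
      simp only [List.map_cons]
      rw [← consHead_nil _ (splitChar_ne_nil (t.map bitChar))]
      have : consHead [] (splitChar (t.map bitChar)) = consHead (List.replicate 0 '0') (splitChar (t.map bitChar)) := rfl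
      rw [this, ih hbt 0]
      simp [dec, treeD, PySem.List.len]

theorem main_eq (bytes_list : List Int) : decode_simple bytes_list = decode_simple_alt bytes_list := by
  unfold decode_simple decode_simple_alt
  have hA : bytes_list.foldl (fun acc i => acc ++ binary i) [] = bytes_list.flatMap binary := by
    simpa using PySem.List.foldl_append_eq_flatMap binary bytes_list []
  have hBbits : (bytes_list.map byteBits).flatten = (bytes_list.flatMap binary).map bitChar := by
    rw [← List.flatMap_def, List.map_flatMap]
    exact List.flatMap_congr (fun b _ => (byteBits_eq b).symm) |>.symm
  have hmem : ∀ i ∈ bytes_list.flatMap binary, i = 0 ∨ i = 1 := by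
    intro i hi
    rw [List.mem_flatMap] at hi
    obtain ⟨b, _, hib⟩ := hi
    rw [binary_eq] at hib
    simp [binList] at hib
    rcases hib with h|h|h|h|h|h|h|h <;> omega
  have hsplit : PySem.Chars.split? ((bytes_list.map byteBits).flatten) ['1']
      = some (splitChar ((bytes_list.flatMap binary).map bitChar)) := by
    rw [PySem.Chars.split?]
    simp only [List.isEmpty_cons, if_false, Bool.false_eq_true]
    rw [hBbits, splitOn_eq]
  simp only [hA, hsplit, Option.getD_some, PySem.List.slice_to_neg_one]
  have happ := foldA (List.flatMap binary bytes_list) [] 0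
  rw [Nat.cast_zero] at happ
  rw [happ]
  rw [← decSplit (bytes_list.flatMap binary) hmem 0]
  congr 1
  rw [show List.replicate 0 '0' = ([] : List Char) from rfl, consHead_nil _ (splitChar_ne_nil _)]
  simp

-- ===== VERDICT (by name: the statement is the Claim_ definition above) =====
theorem decode_simple_spec : Claim_equal_decode_simple := by
  intro bytes_list _ _
  show decode_simple bytes_list = decode_simple_alt bytes_list
  exact main_eq bytes_list
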